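-- pv_equiv track=rewrite | github.com/big-comm/ashyterm | src/ashyterm/terminal/manager.py | _get_last_pipeline_segment
-- ===== SOURCE A (Python) =====
-- def _get_last_pipeline_segment(command_part: str) -> str:
--     """Get the last segment of a pipeline command."""
--     parts = []
--     current = []
--     for char in command_part:
--         if char in "|;&":
--             if current:
--                 parts.append("".join(current).strip())
--                 current = []
--         else:
--             current.append(char)
--     if current:
--         parts.append("".join(current).strip())
--
--     for part in reversed(parts):
--         if part:
--             return part
--     return command_part
-- ===== SOURCE B (Python) =====
-- def _get_last_pipeline_segment(command_part: str) -> str: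
--     """Get the last segment of a pipeline command (single backward scan, early exit)."""
--     seg = []
--     for ch in reversed(command_part):
--         if ch in "|;&":
--             s = "".join(reversed(seg)).strip()
--             if s:
--                 return s
--             seg = []
--         else:
--             seg.append(ch)
--     s = "".join(reversed(seg)).strip()
--     return s if s else command_part
-- ===== Notes on version B (the rewrite author's own statement) =====
-- stated objective: alternative
-- what changed: Replaces A's forward pass that builds a list of stripped segments followed by a reversed search with a single backward character scan that keeps only the current segment and returns the first (rightmost) segment whose strip is non-empty.
import Mathlib
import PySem

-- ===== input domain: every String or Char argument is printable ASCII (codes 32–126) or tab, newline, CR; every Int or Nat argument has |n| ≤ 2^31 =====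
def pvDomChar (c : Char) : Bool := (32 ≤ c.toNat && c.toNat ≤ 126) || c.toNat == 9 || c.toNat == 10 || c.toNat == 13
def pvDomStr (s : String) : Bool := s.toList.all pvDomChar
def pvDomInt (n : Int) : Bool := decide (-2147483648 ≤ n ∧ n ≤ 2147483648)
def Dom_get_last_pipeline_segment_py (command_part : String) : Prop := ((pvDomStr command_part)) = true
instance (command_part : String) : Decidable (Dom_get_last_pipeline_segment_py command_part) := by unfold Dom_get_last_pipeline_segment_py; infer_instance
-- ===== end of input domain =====

-- B replaces A's forward split-into-parts pass by a single backward scan with early exit (objective: alternative).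

-- ===== PORT A =====
-- char in "|;&"
def pvSep (c : Char) : Bool := c == '|' || c == ';' || c == '&'

-- loop body of A: separators flush a non-empty current (stripped) into parts
def pvStepA (st : List (List Char) × List Char) (c : Char) : List (List Char) × List Char :=
  if pvSep c then
    (if st.2 ≠ [] then (st.1 ++ [PySem.Chars.strip st.2], []) else st)
  else (st.1, st.2 ++ [c])

-- 'for part in reversed(parts): if part: return part' (applied to parts.reverse)
def pvLastNonEmpty : List (List Char) → Option (List Char)
  | [] => none
  | p :: rest => if p ≠ [] then some p else pvLastNonEmpty rest

def get_last_pipeline_segment_py (command_part : String) : String :=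
  let st := command_part.toList.foldl pvStepA ([], [])
  let parts := if st.2 ≠ [] then st.1 ++ [PySem.Chars.strip st.2] else st.1
  match pvLastNonEmpty parts.reverse with
  | some p => String.mk p
  | none => command_part

-- ===== PORT B =====
-- backward scan over the reversed character list; acc collects the chars of the
-- current (rightmost unexamined) segment in reversed order; early exit on the
-- first segment whose strip is non-empty
def pvScanB : List Char → List Char → Option (List Char)
  | [], acc =>
    let s := PySem.Chars.strip acc.reverse
    if s ≠ [] then some s else none
  | c :: rest, acc =>
    if pvSep c then
      let s := PySem.Chars.strip acc.reverse
      if s ≠ [] then some s else pvScanB rest []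
    else pvScanB rest (acc ++ [c])

def get_last_pipeline_segment_py_alt (command_part : String) : String :=
  match pvScanB command_part.toList.reverse [] with
  | some s => String.mk s
  | none => command_part

-- ===== PRECONDITION & SPEC =====
def Spec_get_last_pipeline_segment_py (command_part : String) (out : String) : Prop := out = get_last_pipeline_segment_py_alt command_part
instance (command_part : String) (out : String) : Decidable (Spec_get_last_pipeline_segment_py command_part out) := by unfold Spec_get_last_pipeline_segment_py; infer_instance

-- ===== CLAIM (what is proved, stated in full; the proofs are below) =====
def Claim_equal_get_last_pipeline_segment_py : Prop := ∀ (command_part : String), Dom_get_last_pipeline_segment_py command_part → Spec_get_last_pipeline_segment_py command_part (get_last_pipeline_segment_py command_part)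

-- ===== LEMMAS AND PROOFS =====

-- A's final parts list, as a function of the scanned characters
def pvPartsOf (cs : List Char) : List (List Char) :=
  let st := cs.foldl pvStepA ([], [])
  if st.2 ≠ [] then st.1 ++ [PySem.Chars.strip st.2] else st.1

theorem pvFoldl_nonsep (xs : List Char) (st : List (List Char) × List Char)
    (h : ∀ c ∈ xs, pvSep c = false) :
    xs.foldl pvStepA st = (st.1, st.2 ++ xs) := by
  induction xs generalizing st with
  | nil => simp
  | cons x xs ih =>
    have hx : pvSep x = false := h x (by simp)
    simp only [List.foldl_cons, pvStepA, hx, Bool.false_eq_true, if_false]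
    rw [ih _ (fun c hc => h c (by simp [hc]))]
    simp

theorem pvMain (cs acc : List Char) (h : ∀ c ∈ acc, pvSep c = false) :
    pvScanB cs.reverse acc = pvLastNonEmpty (pvPartsOf (cs ++ acc.reverse)).reverse := by
  induction cs using List.reverseRecOn generalizing acc with
  | nil =>
    have hrev : ∀ c ∈ acc.reverse, pvSep c = false := fun c hc => h c (List.mem_reverse.mp hc)
    simp only [List.nil_append, List.reverse_nil, pvScanB, pvPartsOf,
      pvFoldl_nonsep acc.reverse ([], []) hrev, List.nil_append]
    have hstripnil : PySem.Chars.strip ([] : List Char) = [] := rfl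
    by_cases hacc : acc.reverse = []
    · simp [hacc, hstripnil, pvLastNonEmpty]
    · simp [hacc, pvLastNonEmpty]
  | append_singleton ds c ih =>
    rw [List.reverse_append, List.reverse_singleton, List.singleton_append]
    by_cases hc : pvSep c = true
    · -- c is a separator: it flushes; the tail after it is exactly acc.reverse
      have hrev : ∀ x ∈ acc.reverse, pvSep x = false := fun x hx => h x (List.mem_reverse.mp hx)
      have hparts : pvPartsOf (ds ++ [c] ++ acc.reverse)
          = (if acc.reverse ≠ [] then pvPartsOf ds ++ [PySem.Chars.strip acc.reverse] else pvPartsOf ds) := by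
        simp only [pvPartsOf, List.foldl_append, pvFoldl_nonsep acc.reverse _ hrev]
        simp only [List.foldl_cons, List.foldl_nil, pvStepA, hc, if_true]
        by_cases h2 : (ds.foldl pvStepA ([], [])).2 = [] <;> simp [h2]
      rw [pvScanB]
      simp only [hc, if_true, hparts]
      have hih := ih [] (by simp)
      simp only [List.reverse_nil, List.append_nil] at hih
      have hstripnil : PySem.Chars.strip ([] : List Char) = [] := rfl
      by_cases hacc : acc.reverse = []
      · have : acc = [] := by simpa using hacc
        subst this
        simp [hstripnil, hih]
      · simp only [hacc, ne_eq, not_false_eq_true, if_true, List.reverse_append,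
          List.reverse_singleton, List.singleton_append, pvLastNonEmpty]
        by_cases hs : PySem.Chars.strip acc.reverse = []
        · simp [hs, hih]
        · simp [hs]
    · -- c is ordinary: it joins the accumulator
      have hc' : pvSep c = false := by revert hc; cases pvSep c <;> simp
      rw [pvScanB]
      simp only [hc', Bool.false_eq_true, if_false]
      have := ih (acc ++ [c]) (by
        intro x hx
        rcases List.mem_append.mp hx with h1 | h1
        · exact h x h1
        · simp at h1; simp [h1, hc'])
      rw [this]
      simp [List.append_assoc]

-- ===== VERDICT (by name: the statement is the Claim_ definition above) =====
theorem get_last_pipeline_segment_py_spec : Claim_equal_get_last_pipeline_segment_py := by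
  intro cp _
  unfold Spec_get_last_pipeline_segment_py get_last_pipeline_segment_py get_last_pipeline_segment_py_alt
  have := pvMain cp.toList [] (by simp)
  simp only [List.reverse_nil, List.append_nil] at this
  rw [this]
  rfl
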